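-- pv_equiv track=rewrite | github.com/sarthakaggarwal97/valkey-ci-bot | scripts/code_reviewer.py | _split_patch_into_groups
-- ===== SOURCE A (Python) =====
-- def _split_patch_into_groups(patch: str, max_chars: int) -> list[str]:
--     """Split a unified diff patch into groups of hunks that fit within max_chars."""
--     hunks: list[str] = []
--     current_hunk_lines: list[str] = []
--
--     for line in patch.splitlines():
--         if line.startswith("@@") and current_hunk_lines:
--             hunks.append("\n".join(current_hunk_lines))
--             current_hunk_lines = []
--         current_hunk_lines.append(line)
--
--     if current_hunk_lines:
--         hunks.append("\n".join(current_hunk_lines))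
--
--     if not hunks:
--         return [patch]
--
--     groups: list[str] = []
--     current_group: list[str] = []
--     current_size = 0
--
--     for hunk in hunks:
--         if current_size + len(hunk) > max_chars and current_group:
--             groups.append("\n".join(current_group))
--             current_group = []
--             current_size = 0
--         current_group.append(hunk)
--         current_size += len(hunk)
--
--     if current_group:
--         groups.append("\n".join(current_group))
--
--     return groups if groups else [patch]
-- ===== SOURCE B (Python) =====
-- def _pack(groups, current_group, current_size, hunk, max_chars):
--     """Greedy-pack one hunk into the running group state."""
--     if current_size + len(hunk) > max_chars and current_group:
--         groups.append("\n".join(current_group))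
--         current_group = []
--         current_size = 0
--     current_group.append(hunk)
--     return groups, current_group, current_size + len(hunk)
--
--
-- def _split_patch_into_groups(patch: str, max_chars: int) -> list[str]:
--     """Single pass: detect hunk boundaries and greedy-pack each finished hunk immediately."""
--     groups: list[str] = []
--     current_group: list[str] = []
--     current_size = 0
--     current_hunk_lines: list[str] = []
--
--     for line in patch.splitlines():
--         if line.startswith("@@") and current_hunk_lines:
--             groups, current_group, current_size = _pack(
--                 groups, current_group, current_size,
--                 "\n".join(current_hunk_lines), max_chars)
--             current_hunk_lines = []
--         current_hunk_lines.append(line)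
--
--     if current_hunk_lines:
--         groups, current_group, current_size = _pack(
--             groups, current_group, current_size,
--             "\n".join(current_hunk_lines), max_chars)
--
--     if current_group:
--         groups.append("\n".join(current_group))
--
--     return groups if groups else [patch]
-- ===== Notes on version B (the rewrite author's own statement) =====
-- stated objective: alternative
-- what changed: Fused A's two sequential passes (first split the patch into hunks, then greedy-pack the hunk list) into one single pass over the lines that packs each hunk the moment it is finished, so the intermediate hunk list is never built.
import Mathlib
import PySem

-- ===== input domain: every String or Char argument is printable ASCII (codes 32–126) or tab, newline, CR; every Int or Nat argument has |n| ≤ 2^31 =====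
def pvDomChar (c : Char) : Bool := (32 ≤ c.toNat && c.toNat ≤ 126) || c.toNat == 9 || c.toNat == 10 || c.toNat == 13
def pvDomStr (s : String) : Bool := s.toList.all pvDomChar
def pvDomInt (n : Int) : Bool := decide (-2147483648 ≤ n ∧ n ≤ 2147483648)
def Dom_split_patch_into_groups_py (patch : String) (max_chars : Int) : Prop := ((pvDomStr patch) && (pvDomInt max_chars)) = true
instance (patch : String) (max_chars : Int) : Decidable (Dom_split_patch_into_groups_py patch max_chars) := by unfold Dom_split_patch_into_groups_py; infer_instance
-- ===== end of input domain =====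

-- B fuses A's two sequential passes (hunk splitting, then greedy packing) into one pass
-- over the lines; same results, an alternative decomposition (no speed claim).

-- ===== PORT A =====
-- body of A's first loop: push the finished hunk on a "@@" boundary, accumulate the line
def pvAHunkStep (st : List String × List String) (line : String) : List String × List String :=
  let st := if PySem.Str.startswith line "@@" && !st.2.isEmpty then
      (st.1 ++ [PySem.Str.join "\n" st.2], ([] : List String)) else st
  (st.1, st.2 ++ [line])

-- body of A's second loop: greedy-pack one hunk into (groups, current_group, current_size)
def pvAPackStep (max_chars : Int) (st : List String × List String × Int) (hunk : String) :
    List String × List String × Int :=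
  let st := if st.2.2 + (PySem.Str.len hunk : Int) > max_chars && !st.2.1.isEmpty then
      (st.1 ++ [PySem.Str.join "\n" st.2.1], ([] : List String), (0 : Int)) else st
  (st.1, st.2.1 ++ [hunk], st.2.2 + (PySem.Str.len hunk : Int))

def split_patch_into_groups_py (patch : String) (max_chars : Int) : List String :=
  let st := (PySem.Str.splitlines patch).foldl pvAHunkStep ([], [])
  let hunks := if !st.2.isEmpty then st.1 ++ [PySem.Str.join "\n" st.2] else st.1
  if hunks.isEmpty then [patch]
  else
    let st2 := hunks.foldl (pvAPackStep max_chars) ([], [], 0)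
    let groups := if !st2.2.1.isEmpty then st2.1 ++ [PySem.Str.join "\n" st2.2.1] else st2.1
    if groups.isEmpty then [patch] else groups

-- ===== PORT B =====
-- Source B's _pack helper: greedy-pack one hunk into the running group state
def pvPack (max_chars : Int) (st : List String × List String × Int) (hunk : String) :
    List String × List String × Int :=
  let st := if st.2.2 + (PySem.Str.len hunk : Int) > max_chars && !st.2.1.isEmpty then
      (st.1 ++ [PySem.Str.join "\n" st.2.1], ([] : List String), (0 : Int)) else st
  (st.1, st.2.1 ++ [hunk], st.2.2 + (PySem.Str.len hunk : Int))

-- body of B's single loop: on a "@@" boundary, pack the finished hunk at once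
def pvBStep (max_chars : Int) (st : (List String × List String × Int) × List String)
    (line : String) : (List String × List String × Int) × List String :=
  let st := if PySem.Str.startswith line "@@" && !st.2.isEmpty then
      (pvPack max_chars st.1 (PySem.Str.join "\n" st.2), ([] : List String)) else st
  (st.1, st.2 ++ [line])

def split_patch_into_groups_py_alt (patch : String) (max_chars : Int) : List String :=
  let st := (PySem.Str.splitlines patch).foldl (pvBStep max_chars) (([], [], 0), [])
  let pk := if !st.2.isEmpty then pvPack max_chars st.1 (PySem.Str.join "\n" st.2) else st.1
  let groups := if !pk.2.1.isEmpty then pk.1 ++ [PySem.Str.join "\n" pk.2.1] else pk.1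
  if groups.isEmpty then [patch] else groups

-- ===== PRECONDITION & SPEC =====
def Spec_split_patch_into_groups_py (patch : String) (max_chars : Int) (out : List String) : Prop := out = split_patch_into_groups_py_alt patch max_chars
instance (patch : String) (max_chars : Int) (out : List String) : Decidable (Spec_split_patch_into_groups_py patch max_chars out) := by unfold Spec_split_patch_into_groups_py; infer_instance

-- ===== CLAIM (what is proved, stated in full; the proofs are below) =====
def Claim_equal_split_patch_into_groups_py : Prop := ∀ (patch : String) (max_chars : Int), Dom_split_patch_into_groups_py patch max_chars → Spec_split_patch_into_groups_py patch max_chars (split_patch_into_groups_py patch max_chars)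

-- ===== LEMMAS AND PROOFS =====

-- A's hunk loop with accumulator hs is the accumulator-free loop with hs prepended
lemma pvAfold_acc (lines : List String) (hs chl : List String) :
    lines.foldl pvAHunkStep (hs, chl) =
      (hs ++ (lines.foldl pvAHunkStep ([], chl)).1, (lines.foldl pvAHunkStep ([], chl)).2) := by
  induction lines generalizing hs chl with
  | nil => simp
  | cons l ls ih =>
    simp only [List.foldl_cons, pvAHunkStep]
    by_cases h : PySem.Str.startswith l "@@" && !chl.isEmpty
    · simp only [h, if_pos, List.nil_append]
      rw [ih (hs ++ [PySem.Str.join "\n" chl]), ih [PySem.Str.join "\n" chl]]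
      simp
    · simp only [h, if_neg, Bool.false_eq_true, not_false_iff]
      exact ih hs (chl ++ [l])

-- fusion: B's single loop = pack-fold over the hunks produced by A's hunk loop
lemma pvFuse (mc : Int) (lines : List String) (pk : List String × List String × Int)
    (chl : List String) :
    lines.foldl (pvBStep mc) (pk, chl) =
      (List.foldl (pvPack mc) pk (lines.foldl pvAHunkStep ([], chl)).1,
       (lines.foldl pvAHunkStep ([], chl)).2) := by
  induction lines generalizing pk chl with
  | nil => simp
  | cons l ls ih =>
    simp only [List.foldl_cons, pvBStep, pvAHunkStep]
    by_cases h : PySem.Str.startswith l "@@" && !chl.isEmpty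
    · simp only [h, if_pos, List.nil_append]
      rw [ih (pvPack mc pk (PySem.Str.join "\n" chl)) [l],
          pvAfold_acc ls [PySem.Str.join "\n" chl] [l]]
      simp
    · simp only [h, if_neg, Bool.false_eq_true, not_false_iff]
      exact ih pk (chl ++ [l])

-- A's pack step and B's _pack are definitionally the same function
lemma pvPack_eq_pvAPackStep (mc : Int) : pvPack mc = pvAPackStep mc := rfl

-- ===== VERDICT (by name: the statement is the Claim_ definition above) =====
theorem split_patch_into_groups_py_spec : Claim_equal_split_patch_into_groups_py := by
  intro patch max_chars _
  show split_patch_into_groups_py patch max_chars = split_patch_into_groups_py_alt patch max_chars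
  unfold split_patch_into_groups_py split_patch_into_groups_py_alt
  rw [pvFuse]
  set T := (PySem.Str.splitlines patch).foldl pvAHunkStep ([], []) with hT
  by_cases hc : T.2.isEmpty
  · -- no pending hunk lines: hunks = T.1
    simp only [hc, Bool.not_true, Bool.false_eq_true, if_neg, not_false_iff,
      pvPack_eq_pvAPackStep]
    by_cases hh : T.1.isEmpty
    · rcases T with ⟨hs, chl⟩
      simp only at hh hc
      rw [List.isEmpty_iff] at hh hc
      subst hh; subst hc
      simp
    · simp [hh]
  · -- pending hunk: hunks = T.1 ++ [join T.2]
    simp only [hc, Bool.not_false, if_pos, pvPack_eq_pvAPackStep]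
    have hne : (T.1 ++ [PySem.Str.join "\n" T.2]).isEmpty = false := by simp
    simp [hne, List.foldl_append]
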